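-- pv_equiv track=rewrite | github.com/adamjalkemo/adventofcode | 2020/16/solution.py | get_compatible_ticket_column_per_category
-- ===== SOURCE A (Python) =====
-- def get_compatible_ticket_column_per_category(rule_ranges, tickets):
--     columns_by_category = {}
--     columns = list(zip(*tickets))
--     for category, ranges in rule_ranges.items():
--         columns_by_category[category] = set()
--         for i, column in enumerate(columns):
--             failed = False
--             for value in column:
--                 for range in ranges:
--                     if range[0] <= value <= range[1]:
--                         break
--                 else:
--                     failed = True
--                     break
--
--             if not failed:
--                 columns_by_category[category].add(i)
--     return columns_by_category
-- ===== SOURCE B (Python) =====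
-- def get_compatible_ticket_column_per_category(rule_ranges, tickets):
--     n = min((len(t) for t in tickets), default=0)
--
--     def surviving_columns(ranges):
--         # narrow the surviving column indices ticket by ticket (row-major)
--         good = list(range(n))
--         for t in tickets:
--             good = [i for i in good if any(lo <= t[i] <= hi for lo, hi in ranges)]
--         return set(good)
--
--     return {category: surviving_columns(ranges)
--             for category, ranges in rule_ranges.items()}
-- ===== Notes on version B (the rewrite author's own statement) =====
-- stated objective: simpler
-- what changed: B drops the transpose and the mutated dict-of-sets: it computes the common column count once and, per category, narrows the list of column indices row-major, filtering it through each ticket in turn and returning the survivors as a comprehension-built dict.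
import Mathlib
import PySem

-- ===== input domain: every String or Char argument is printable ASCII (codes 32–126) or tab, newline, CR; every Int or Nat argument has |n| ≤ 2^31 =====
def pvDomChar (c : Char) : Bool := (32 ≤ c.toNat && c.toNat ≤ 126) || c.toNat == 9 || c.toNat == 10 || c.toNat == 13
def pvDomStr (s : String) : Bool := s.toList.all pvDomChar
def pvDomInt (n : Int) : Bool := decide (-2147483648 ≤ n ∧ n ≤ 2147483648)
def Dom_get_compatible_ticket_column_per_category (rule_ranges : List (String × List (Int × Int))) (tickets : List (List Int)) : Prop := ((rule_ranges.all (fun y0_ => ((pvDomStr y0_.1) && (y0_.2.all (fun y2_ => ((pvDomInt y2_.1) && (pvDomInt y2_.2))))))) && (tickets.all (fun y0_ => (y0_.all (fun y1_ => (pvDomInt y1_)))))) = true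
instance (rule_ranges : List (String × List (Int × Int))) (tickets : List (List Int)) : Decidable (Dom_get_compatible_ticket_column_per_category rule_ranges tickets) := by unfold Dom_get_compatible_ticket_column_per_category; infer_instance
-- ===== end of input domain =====

-- B replaces A's transpose-then-rescan (dict of sets mutated per category) by a row-major
-- narrowing: per category it filters the list of column indices 0..min(len)-1 down ticket by
-- ticket, keeping indices whose value fits some range; objective: simpler, same asymptotic cost.

-- ===== PORT A =====
-- helper of A: columns = list(zip(*tickets)) — transpose truncated to the shortest row (exact port of Python zip(*…))
def pvColumns (tickets : List (List Int)) : List (List Int) :=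
  match tickets with
  | [] => []
  | t :: rest =>
    let n := (t :: rest).foldl (fun m u => min m u.length) t.length
    (List.range n).map (fun j => (t :: rest).map (fun u => u.getD j 0))

def get_compatible_ticket_column_per_category (rule_ranges : List (String × List (Int × Int))) (tickets : List (List Int)) : List (String × List Int) :=
  let columns := pvColumns tickets
  let d : PySem.Dict String (PySem.Set Int) :=
    rule_ranges.foldl (fun d p =>
      let d1 := d.insert p.1 PySem.Set.empty
      let s := (PySem.List.enumerate columns).foldl (fun s ic =>
        let failed := ic.2.any (fun v => !(p.2.any (fun r => decide (r.1 ≤ v ∧ v ≤ r.2))))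
        if !failed then PySem.Set.add s ic.1 else s) PySem.Set.empty
      d1.insert p.1 s) PySem.Dict.empty
  d.items

-- ===== PORT B =====
def get_compatible_ticket_column_per_category_alt (rule_ranges : List (String × List (Int × Int))) (tickets : List (List Int)) : List (String × List Int) :=
  -- n = min((len(t) for t in tickets), default=0)
  let n : Int := PySem.List.minD (tickets.map (fun t => PySem.List.len t)) (fun x => x) 0
  rule_ranges.map (fun p => (p.1,
    -- surviving_columns(p.2): good = list(range(n)); for t in tickets: good = [i … if any …]; set(good)
    PySem.Set.ofList (tickets.foldl (fun good t =>
      good.filter (fun i => p.2.any (fun r =>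
        decide (r.1 ≤ PySem.List.pyGetD t i 0 ∧ PySem.List.pyGetD t i 0 ≤ r.2))))
      (PySem.List.pyRange 0 n 1))))

-- ===== PRECONDITION & SPEC =====
-- rule_ranges is a Python dict, so its keys are distinct; Lean association lists with duplicate
-- keys correspond to no Python input and are excluded.
def Pre_get_compatible_ticket_column_per_category (rule_ranges : List (String × List (Int × Int))) (tickets : List (List Int)) : Prop :=
  (rule_ranges.map (fun p => p.1)).Nodup
instance (rule_ranges : List (String × List (Int × Int))) (tickets : List (List Int)) : Decidable (Pre_get_compatible_ticket_column_per_category rule_ranges tickets) := by unfold Pre_get_compatible_ticket_column_per_category; infer_instance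
def pvWitness_get_compatible_ticket_column_per_category : (List (String × List (Int × Int))) × List (List Int) :=
  ([("row", [(0, 5), (8, 19)]), ("seat", [(3, 13)])], [[3, 9], [11, 2]])

def Spec_get_compatible_ticket_column_per_category (rule_ranges : List (String × List (Int × Int))) (tickets : List (List Int)) (out : List (String × List Int)) : Prop := out = get_compatible_ticket_column_per_category_alt rule_ranges tickets
instance (rule_ranges : List (String × List (Int × Int))) (tickets : List (List Int)) (out : List (String × List Int)) : Decidable (Spec_get_compatible_ticket_column_per_category rule_ranges tickets out) := by unfold Spec_get_compatible_ticket_column_per_category; infer_instance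

-- ===== CLAIM (what is proved, stated in full; the proofs are below) =====
def Claim_equal_get_compatible_ticket_column_per_category : Prop := ∀ (rule_ranges : List (String × List (Int × Int))) (tickets : List (List Int)), Dom_get_compatible_ticket_column_per_category rule_ranges tickets → Pre_get_compatible_ticket_column_per_category rule_ranges tickets → Spec_get_compatible_ticket_column_per_category rule_ranges tickets (get_compatible_ticket_column_per_category rule_ranges tickets)

-- ===== LEMMAS AND PROOFS =====
-- value v satisfies some range of rs
def pvFits (rs : List (Int × Int)) (v : Int) : Bool := rs.any (fun r => decide (r.1 ≤ v ∧ v ≤ r.2))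

-- the per-category set A accumulates over the enumerated columns
def pvSetA (cols : List (List Int)) (rs : List (Int × Int)) : PySem.Set Int :=
  (PySem.List.enumerate cols).foldl (fun s ic =>
    if !(ic.2.any (fun v => !(pvFits rs v))) then PySem.Set.add s ic.1 else s) PySem.Set.empty

-- A's output is the map over categories of its accumulated set
theorem pv_A_items (rr : List (String × List (Int × Int))) (tk : List (List Int))
    (hnd : (rr.map (fun p => p.1)).Nodup) :
    get_compatible_ticket_column_per_category rr tk
      = rr.map (fun p => (p.1, pvSetA (pvColumns tk) p.2)) := by
  show (rr.foldl (fun d p =>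
      (d.insert p.1 PySem.Set.empty).insert p.1
        ((PySem.List.enumerate (pvColumns tk)).foldl (fun s ic =>
          if !(ic.2.any (fun v => !(p.2.any (fun r => decide (r.1 ≤ v ∧ v ≤ r.2))))) then PySem.Set.add s ic.1 else s)
          PySem.Set.empty)) PySem.Dict.empty).items = _
  rw [PySem.List.foldl_congr_mem rr
    (fun d p => (d.insert p.1 PySem.Set.empty).insert p.1
      ((PySem.List.enumerate (pvColumns tk)).foldl (fun s ic =>
        if !(ic.2.any (fun v => !(p.2.any (fun r => decide (r.1 ≤ v ∧ v ≤ r.2))))) then PySem.Set.add s ic.1 else s)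
        PySem.Set.empty))
    (fun d p => d.insert p.1 (pvSetA (pvColumns tk) p.2)) PySem.Dict.empty
    (fun acc p _ => PySem.Dict.insert_insert_self acc p.1 PySem.Set.empty _),
    PySem.Dict.items_foldl_insert_fresh rr (fun p => p.1) (fun p => pvSetA (pvColumns tk) p.2)
      PySem.Dict.empty (fun a _ => by rfl) hnd]
  rfl

-- enumerate of a range-indexed map
theorem pv_enum_map_range (g : Nat → List Int) (n : Nat) (k : Int) :
    PySem.List.enumerate ((List.range n).map g) k
      = (List.range n).map (fun (j : Nat) => (k + (j : Int), g j)) := by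
  induction n with
  | zero => rfl
  | succ m ih =>
    rw [List.range_succ]
    simp [List.map_append, PySem.List.enumerate_append, ih,
      PySem.List.enumerate_cons, PySem.List.enumerate_nil]

-- a conditional-add fold is an update by the filtered first components
theorem pv_foldl_if_add (q : Int × List Int → Bool) (l : List (Int × List Int)) (s0 : PySem.Set Int) :
    l.foldl (fun s ic => if q ic then PySem.Set.add s ic.1 else s) s0
      = PySem.Set.update s0 ((l.filter q).map (fun ic => ic.1)) := by
  induction l generalizing s0 with
  | nil => rw [List.filter_nil, List.map_nil, PySem.Set.update_nil]; rfl
  | cons a t ih =>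
    rw [List.foldl_cons, List.filter_cons]
    by_cases h : q a
    · rw [if_pos h, if_pos h, List.map_cons, PySem.Set.update_cons, ih]
    · rw [if_neg h, if_neg h, ih]

-- a chain of filters is one filter by the conjunction of the conditions
theorem pv_narrow_fold (c : List Int → Int → Bool) (ts : List (List Int)) (g : List Int) :
    ts.foldl (fun good t => good.filter (c t)) g
      = g.filter (fun i => ts.all (fun t => c t i)) := by
  induction ts generalizing g with
  | nil => simp
  | cons t rest ih =>
    rw [List.foldl_cons, ih, List.filter_filter]
    apply List.filter_congr
    intro i _
    rw [List.all_cons, Bool.and_comm]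

-- casting the Nat min-fold used by pvColumns to Int gives B's min over lengths
theorem pv_foldl_min_cast (l : List (List Int)) (a : Nat) :
    ((l.foldl (fun m u => min m u.length) a : Nat) : Int)
      = l.foldl (fun m u => min m (PySem.List.len u)) (a : Int) := by
  induction l generalizing a with
  | nil => rfl
  | cons u t ih =>
    rw [List.foldl_cons, List.foldl_cons, ih, Nat.cast_min, PySem.List.len_eq]

-- per-category: A's accumulated set equals B's comprehension
theorem pv_set_eq (tk : List (List Int)) (rs : List (Int × Int)) :
    pvSetA (pvColumns tk) rs
      = PySem.Set.ofList (tk.foldl (fun good t =>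
          good.filter (fun i => rs.any (fun r =>
            decide (r.1 ≤ PySem.List.pyGetD t i 0 ∧ PySem.List.pyGetD t i 0 ≤ r.2))))
          (PySem.List.pyRange 0
            (PySem.List.minD (tk.map (fun t => PySem.List.len t)) (fun x => x) 0) 1)) := by
  rw [pv_narrow_fold]
  match tk with
  | [] => rfl
  | t :: rest =>
    -- B's n is the cast of A's truncation length n'
    have hmin : PySem.List.minD ((t :: rest).map (fun u => PySem.List.len u)) (fun x => x) 0
        = (((t :: rest).foldl (fun m u => min m u.length) t.length : Nat) : Int) := by
      rw [List.map_cons, PySem.List.minD, PySem.List.min?_id_cons, Option.getD_some,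
        List.foldl_map, List.foldl_cons, pv_foldl_min_cast]
      simp
    rw [hmin]
    set n' := (t :: rest).foldl (fun m u => min m u.length) t.length with hn'
    have hcols : pvColumns (t :: rest)
        = (List.range n').map (fun j => (t :: rest).map (fun u => u.getD j 0)) := by
      rw [pvColumns]
    rw [pvSetA, hcols, pv_enum_map_range, pv_foldl_if_add, PySem.Set.update_empty,
      List.filter_map, PySem.List.pyRange_zero_natCast, List.filter_map]
    simp only [Function.comp_def]
    simp [pvFits, List.all_eq_not_any_not, List.any_map, zero_add, Function.comp_def]

-- ===== VERDICT (by name: the statement is the Claim_ definition above) =====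
theorem get_compatible_ticket_column_per_category_spec : Claim_equal_get_compatible_ticket_column_per_category := by
  intro rr tk _ hpre
  show _ = _
  rw [pv_A_items rr tk hpre]
  unfold get_compatible_ticket_column_per_category_alt
  apply List.map_congr_left
  intro p _
  rw [pv_set_eq]
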